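-- pv_equiv track=rewrite | github.com/edjah/Euler | problems/101-200/p191.py | calc
-- ===== SOURCE A (Python) =====
-- cache = {}
--
-- def calc(a, l, k):
--     if l > 1 or a > 2:
--         return 0
--     elif k <= 0:
--         return 1
--     elif (a, l, k) in cache:
--         return cache[(a, l, k)]
--     t = 0
--     t += calc(0, l, k - 1)
--     t += calc(a + 1, l, k - 1)
--     t += calc(0, l + 1, k - 1)
--     cache[(a, l, k)] = t
--     return t
-- ===== SOURCE B (Python) =====
-- def calc(a, l, k):
--     if l > 1 or a > 2:
--         return 0
--     if k <= 0:
--         return 1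
--     # forward vector DP over the six in-range states (a, l) with 0 <= a <= 2, 0 <= l <= 1;
--     # c_al holds the count for a remaining length that starts at 0 and grows to k
--     c00 = c10 = c20 = c01 = c11 = c21 = 1
--     while k > 0:
--         c00, c10, c20, c01, c11, c21 = (
--             c00 + c10 + c01,
--             c00 + c20 + c01,
--             c00 + c01,
--             c01 + c11,
--             c01 + c21,
--             c01,
--         )
--         k -= 1
--     return {(0, 0): c00, (1, 0): c10, (2, 0): c20,
--             (0, 1): c01, (1, 1): c11, (2, 1): c21}[(a, l)]
-- ===== Notes on version B (the rewrite author's own statement) =====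
-- stated objective: alternative
-- what changed: Replaces the memoized top-down recursion over (a,l,k) states with an iterative forward DP that keeps just six counters (one per in-range (a,l) state) and updates them simultaneously k times in a while loop.
-- outside the precondition, e.g. on calc(-1, 0, 2): A returns 8, B raises KeyError
import Mathlib
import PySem

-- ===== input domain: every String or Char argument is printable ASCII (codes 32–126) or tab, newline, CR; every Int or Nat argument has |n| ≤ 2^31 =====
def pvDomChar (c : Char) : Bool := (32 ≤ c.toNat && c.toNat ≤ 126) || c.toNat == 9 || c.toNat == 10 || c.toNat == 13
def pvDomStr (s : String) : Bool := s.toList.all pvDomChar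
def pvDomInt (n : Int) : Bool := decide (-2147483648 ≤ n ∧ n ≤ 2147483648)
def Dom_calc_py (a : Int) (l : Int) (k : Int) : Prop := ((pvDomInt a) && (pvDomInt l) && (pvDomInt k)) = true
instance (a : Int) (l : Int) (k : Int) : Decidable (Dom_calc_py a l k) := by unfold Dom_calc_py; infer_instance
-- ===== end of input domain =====

-- B replaces the memoized recursion by a forward 6-state vector DP (recursion → iteration); equivalence proved on nonnegative counts a, l.
-- (A's cache is a module-level dict that persists across calls; since the memoized function is pure this never changes the
-- returned value, and the port threads a cache that starts empty at each top-level call — return values only.)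


-- ===== PORT A =====
-- the recursion with the memo dict threaded through explicitly (value, cache after the call)
def calcA (a : Int) (l : Int) (k : Int) (cache : PySem.Dict (Int × Int × Int) Int) :
    Int × PySem.Dict (Int × Int × Int) Int :=
  if l > 1 ∨ a > 2 then (0, cache)
  else if k ≤ 0 then (1, cache)
  else match cache.get? (a, l, k) with
  | some v => (v, cache)
  | none =>
    let p1 := calcA 0 l (k - 1) cache
    let p2 := calcA (a + 1) l (k - 1) p1.2
    let p3 := calcA 0 (l + 1) (k - 1) p2.2
    let t := p1.1 + p2.1 + p3.1
    (t, p3.2.insert (a, l, k) t)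
termination_by k.toNat
decreasing_by all_goals omega

def calc_py (a : Int) (l : Int) (k : Int) : Int := (calcA a l k PySem.Dict.empty).1

-- ===== PORT B =====
-- one step of the while loop: the simultaneous tuple assignment
def stepB (s : Int × Int × Int × Int × Int × Int) : Int × Int × Int × Int × Int × Int :=
  match s with
  | (c00, c10, c20, c01, c11, c21) =>
      (c00 + c10 + c01, c00 + c20 + c01, c00 + c01, c01 + c11, c01 + c21, c01)

-- the `while k > 0:` loop
def loopB (k : Int) (s : Int × Int × Int × Int × Int × Int) : Int × Int × Int × Int × Int × Int :=
  if k ≤ 0 then s else loopB (k - 1) (stepB s)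
termination_by k.toNat
decreasing_by omega

def calc_py_alt (a : Int) (l : Int) (k : Int) : Int :=
  if l > 1 ∨ a > 2 then 0
  else if k ≤ 0 then 1
  else
    match loopB k (1, 1, 1, 1, 1, 1) with
    | (c00, c10, c20, c01, c11, c21) =>
      -- the final dict lookup keyed by (a, l); under Pre_ the key is one of the six
      if a = 0 ∧ l = 0 then c00
      else if a = 1 ∧ l = 0 then c10
      else if a = 2 ∧ l = 0 then c20
      else if a = 0 ∧ l = 1 then c01
      else if a = 1 ∧ l = 1 then c11
      else c21

-- ===== PRECONDITION & SPEC =====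
-- Pre_ keeps the natural domain of the counters (a = run of absent days and l = late days are
-- nonnegative counts) plus the guard corners; it excludes only negative a or l reaching the DP,
-- where A still returns a value but B's final table lookup raises KeyError (cited in the claim).
def Pre_calc_py (a : Int) (l : Int) (k : Int) : Prop := (0 ≤ a ∧ 0 ≤ l) ∨ (l > 1 ∨ a > 2) ∨ k ≤ 0
instance (a : Int) (l : Int) (k : Int) : Decidable (Pre_calc_py a l k) := by unfold Pre_calc_py; infer_instance
def pvWitness_calc_py : Int × Int × Int := (0, 0, 4)

def Spec_calc_py (a : Int) (l : Int) (k : Int) (out : Int) : Prop := out = calc_py_alt a l k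
instance (a : Int) (l : Int) (k : Int) (out : Int) : Decidable (Spec_calc_py a l k out) := by unfold Spec_calc_py; infer_instance

-- ===== CLAIM (what is proved, stated in full; the proofs are below) =====
def Claim_equal_calc_py : Prop := ∀ (a : Int) (l : Int) (k : Int), Dom_calc_py a l k → Pre_calc_py a l k → Spec_calc_py a l k (calc_py a l k)

-- ===== LEMMAS AND PROOFS =====

-- the mathematical value of the recursion, with no cache (proof device)
def calcF (a : Int) (l : Int) (k : Int) : Int :=
  if l > 1 ∨ a > 2 then 0
  else if k ≤ 0 then 1
  else calcF 0 l (k - 1) + calcF (a + 1) l (k - 1) + calcF 0 (l + 1) (k - 1)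
termination_by k.toNat
decreasing_by all_goals omega

theorem calcF_dead (a l k : Int) (h : l > 1 ∨ a > 2) : calcF a l k = 0 := by
  rw [calcF]; simp [h]

theorem calcF_zero (a l k : Int) (h : ¬(l > 1 ∨ a > 2)) (hk : k ≤ 0) : calcF a l k = 1 := by
  rw [calcF]; simp [h, hk]

theorem calcF_succ (a l k : Int) (h : ¬(l > 1 ∨ a > 2)) (hk : ¬ k ≤ 0) :
    calcF a l k = calcF 0 l (k - 1) + calcF (a + 1) l (k - 1) + calcF 0 (l + 1) (k - 1) := by
  rw [calcF]; simp [h, hk]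

-- cache correctness: every entry stores the mathematical value of its key
def GoodCache (c : PySem.Dict (Int × Int × Int) Int) : Prop :=
  ∀ (x : Int × Int × Int) (v : Int), c.get? x = some v → v = calcF x.1 x.2.1 x.2.2

theorem calcA_correct : ∀ (n : ℕ) (a l k : Int) (c : PySem.Dict (Int × Int × Int) Int),
    k.toNat = n → GoodCache c →
    (calcA a l k c).1 = calcF a l k ∧ GoodCache (calcA a l k c).2 := by
  intro n
  induction n with
  | zero =>
    intro a l k c hk hc
    rw [calcA]
    by_cases hd : l > 1 ∨ a > 2
    · simp only [if_pos hd]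
      exact ⟨(calcF_dead a l k hd).symm, hc⟩
    · have hk0 : k ≤ 0 := by omega
      simp only [if_neg hd, if_pos hk0]
      exact ⟨(calcF_zero a l k hd hk0).symm, hc⟩
  | succ m ih =>
    intro a l k c hk hc
    rw [calcA]
    by_cases hd : l > 1 ∨ a > 2
    · simp only [if_pos hd]
      exact ⟨(calcF_dead a l k hd).symm, hc⟩
    · have hk0 : ¬ k ≤ 0 := by omega
      simp only [if_neg hd, if_neg hk0]
      cases hget : c.get? (a, l, k) with
      | some v =>
        simp only []
        exact ⟨hc (a, l, k) v hget, hc⟩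
      | none =>
        simp only []
        obtain ⟨h1, g1⟩ := ih 0 l (k - 1) c (by omega) hc
        obtain ⟨h2, g2⟩ := ih (a + 1) l (k - 1) _ (by omega) g1
        obtain ⟨h3, g3⟩ := ih 0 (l + 1) (k - 1) _ (by omega) g2
        have ht : (calcA 0 l (k-1) c).1 + (calcA (a+1) l (k-1) (calcA 0 l (k-1) c).2).1 +
            (calcA 0 (l+1) (k-1) (calcA (a+1) l (k-1) (calcA 0 l (k-1) c).2).2).1 = calcF a l k := by
          rw [h1, h2, h3, calcF_succ a l k hd hk0]
        refine ⟨ht, ?_⟩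
        intro x v hx
        rw [PySem.Dict.get?_insert] at hx
        by_cases hxe : x = (a, l, k)
        · rw [if_pos hxe] at hx
          cases hx
          subst hxe
          exact ht
        · rw [if_neg hxe] at hx
          exact g3 x v hx

theorem calc_py_eq_calcF (a l k : Int) : calc_py a l k = calcF a l k := by
  have := calcA_correct k.toNat a l k PySem.Dict.empty rfl
    (by intro x v hx; simp [PySem.Dict.get?_empty] at hx)
  exact this.1

theorem loopB_eq_iterate : ∀ (n : ℕ) (k : Int) (s : Int × Int × Int × Int × Int × Int),
    k.toNat = n → loopB k s = stepB^[n] s := by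
  intro n
  induction n with
  | zero =>
    intro k s hk
    rw [loopB]; simp [show k ≤ 0 by omega]
  | succ m ih =>
    intro k s hk
    rw [loopB]
    rw [if_neg (by omega)]
    rw [ih (k - 1) (stepB s) (by omega), Function.iterate_succ_apply]

theorem iterate_inv : ∀ (n : ℕ),
    stepB^[n] (1, 1, 1, 1, 1, 1) =
      (calcF 0 0 n, calcF 1 0 n, calcF 2 0 n, calcF 0 1 n, calcF 1 1 n, calcF 2 1 n) := by
  intro n
  induction n with
  | zero =>
    have h00 := calcF_zero 0 0 0 (by omega) (by omega)
    have h10 := calcF_zero 1 0 0 (by omega) (by omega)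
    have h20 := calcF_zero 2 0 0 (by omega) (by omega)
    have h01 := calcF_zero 0 1 0 (by omega) (by omega)
    have h11 := calcF_zero 1 1 0 (by omega) (by omega)
    have h21 := calcF_zero 2 1 0 (by omega) (by omega)
    simp [h00, h10, h20, h01, h11, h21]
  | succ m ih =>
    rw [Function.iterate_succ_apply', ih]
    have hm : ((m : Int) + 1) - 1 = (m : Int) := by ring
    have e00 := calcF_succ 0 0 ((m : Int) + 1) (by omega) (by omega)
    have e10 := calcF_succ 1 0 ((m : Int) + 1) (by omega) (by omega)
    have e20 := calcF_succ 2 0 ((m : Int) + 1) (by omega) (by omega)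
    have e01 := calcF_succ 0 1 ((m : Int) + 1) (by omega) (by omega)
    have e11 := calcF_succ 1 1 ((m : Int) + 1) (by omega) (by omega)
    have e21 := calcF_succ 2 1 ((m : Int) + 1) (by omega) (by omega)
    have d30 := calcF_dead 3 0 (m : Int) (by omega)
    have d31 := calcF_dead 3 1 (m : Int) (by omega)
    have d02 := calcF_dead 0 2 (m : Int) (by omega)
    simp only [hm] at e00 e10 e20 e01 e11 e21
    simp only [stepB, Nat.cast_succ]
    rw [e00, e10, e20, e01, e11, e21]
    norm_num [d30, d31, d02]

-- ===== VERDICT (by name: the statement is the Claim_ definition above) =====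
theorem calc_py_spec : Claim_equal_calc_py := by
  intro a l k _ hpre
  unfold Spec_calc_py
  rw [calc_py_eq_calcF]
  unfold calc_py_alt
  by_cases hd : l > 1 ∨ a > 2
  · rw [if_pos hd, calcF_dead a l k hd]
  · rw [if_neg hd]
    by_cases hk : k ≤ 0
    · rw [if_pos hk, calcF_zero a l k hd hk]
    · rw [if_neg hk]
      obtain ⟨ha, hl⟩ : 0 ≤ a ∧ 0 ≤ l := by
        rcases hpre with h | h | h
        · exact h
        · exact absurd h hd
        · exact absurd h hk
      have hkn : k = ((k.toNat : Nat) : Int) := by omega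
      rw [loopB_eq_iterate k.toNat k _ rfl, iterate_inv, ← hkn]
      have ha2 : a = 0 ∨ a = 1 ∨ a = 2 := by omega
      have hl2 : l = 0 ∨ l = 1 := by omega
      rcases ha2 with rfl | rfl | rfl <;> rcases hl2 with rfl | rfl <;>
        simp
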